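-- pv_equiv track=rewrite | github.com/Manitary/advent-of-code | 2016/python/03.py | scan2
-- ===== SOURCE A (Python) =====
-- def scan2(data):
--     r, c = 0, 0
--     while c < len(data[0]):
--         yield data[r][c], data[r+1][c], data[r+2][c]
--         r += 3
--         if r >= len(data):
--             r = 0
--             c += 1
-- ===== SOURCE B (Python) =====
-- def scan2(data):
--     # Staged: build the per-row-block triple lists first (block-major), then
--     # transpose with zip(*...) so the flattened emission order is column-major.
--     w = len(data[0])
--     blocks = [[(data[i][c], data[i + 1][c], data[i + 2][c]) for c in range(w)]
--               for i in range(0, len(data), 3)]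
--     for column in zip(*blocks):
--         yield from column
-- ===== Notes on version B (the rewrite author's own statement) =====
-- stated objective: alternative
-- what changed: A emits triples directly in column-major order with a hand-rolled (r,c) while-loop state machine; B instead builds all row-block triple lists in block-major order as an intermediate list of lists and then transposes it with zip(*blocks), flattening the transpose to recover the column-major order.
import Mathlib
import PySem

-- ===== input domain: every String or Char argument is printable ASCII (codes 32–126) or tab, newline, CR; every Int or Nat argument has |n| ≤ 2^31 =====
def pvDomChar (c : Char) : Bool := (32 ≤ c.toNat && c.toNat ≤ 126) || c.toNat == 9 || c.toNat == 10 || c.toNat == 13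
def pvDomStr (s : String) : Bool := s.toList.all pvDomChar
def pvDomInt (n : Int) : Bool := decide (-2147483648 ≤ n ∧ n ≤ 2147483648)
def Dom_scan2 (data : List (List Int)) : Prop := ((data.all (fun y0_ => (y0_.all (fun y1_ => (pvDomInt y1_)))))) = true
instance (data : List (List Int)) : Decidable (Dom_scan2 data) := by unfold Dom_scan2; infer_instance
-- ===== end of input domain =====

-- B builds the row-block triple lists block-major and then transposes (zip(*blocks)),
-- instead of A's direct column-major (r,c) while-loop state machine; equal on Pre_
-- (exactly the inputs where A returns).

-- ===== PORT A =====
-- The while loop over the mutable state (r, c, yielded list) becomes fuel-bounded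
-- recursion over the same state; fuel only makes it total, the initial fuel is large
-- enough that it never runs out on any input where Python's loop terminates normally.
-- Each `none` of pyGet? is a Python IndexError (the loop raises there; outside Pre_).
def scan2Loop (data : List (List Int)) : Nat → Nat → Nat → List (Int × Int × Int) → List (Int × Int × Int)
  | 0, _, _, acc => acc.reverse
  | fuel + 1, r, c, acc =>
    match PySem.List.pyGet? data 0 with          -- len(data[0])
    | none => acc.reverse                        -- IndexError on data[0]
    | some row0 =>
      if c < row0.length then                    -- while c < len(data[0])
        match PySem.List.pyGet? data (r : Int), PySem.List.pyGet? data ((r : Int) + 1),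
              PySem.List.pyGet? data ((r : Int) + 2) with
        | some ra, some rb, some rc =>
          match PySem.List.pyGet? ra (c : Int), PySem.List.pyGet? rb (c : Int),
                PySem.List.pyGet? rc (c : Int) with
          | some x, some y, some z =>            -- yield data[r][c], data[r+1][c], data[r+2][c]
            if r + 3 ≥ data.length then          -- r += 3; if r >= len(data): r = 0; c += 1
              scan2Loop data fuel 0 (c + 1) ((x, y, z) :: acc)
            else
              scan2Loop data fuel (r + 3) c ((x, y, z) :: acc)
          | _, _, _ => acc.reverse               -- IndexError on a row
        | _, _, _ => acc.reverse                 -- IndexError on data[r]/data[r+1]/data[r+2]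

      else acc.reverse

def scan2 (data : List (List Int)) : List (Int × Int × Int) :=
  scan2Loop data (((data.headD []).length + 1) * (data.length + 3)) 0 0 []

-- ===== PORT B =====
-- one cell data[i+k][c]; .getD 0 only covers the IndexError cases, which lie outside Pre_
def pvCell (data : List (List Int)) (i : Int) (c : Nat) : Int :=
  ((PySem.List.pyGet? data i).bind fun row => PySem.List.pyGet? row (c : Int)).getD 0

-- zip(*blocks): Python's zip stops at the first exhausted list; the fuel is the length
-- Python actually reaches under Pre_ (all blocks have length w), making this exact there.
def pvZipStar : Nat → List (List (Int × Int × Int)) → List (List (Int × Int × Int))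
  | 0, _ => []
  | n + 1, bs =>
    if bs.any (·.isEmpty) then []
    else (bs.map fun l => l.headD (0, 0, 0)) :: pvZipStar n (bs.map List.tail)

def scan2_alt (data : List (List Int)) : List (Int × Int × Int) :=
  match PySem.List.pyGet? data 0 with            -- w = len(data[0]); IndexError outside Pre_
  | none => []
  | some row0 =>
    let w := row0.length
    let blocks := (PySem.List.pyRange 0 (data.length : Int) 3).map fun i =>
      (List.range w).map fun c => (pvCell data i c, pvCell data (i + 1) c, pvCell data (i + 2) c)
    (pvZipStar w blocks).flatten                 -- for column in zip(*blocks): yield from column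

-- ===== PRECONDITION & SPEC =====
-- Exactly the inputs on which Python A returns: data nonempty, and either the first row is
-- empty (the loop never runs) or the row count is a multiple of 3 and every row is at least
-- as long as the first (otherwise some data[r+k] / row[c] raises IndexError).
def Pre_scan2 (data : List (List Int)) : Prop :=
  data ≠ [] ∧ ((data.headD []).length = 0 ∨
    (data.length % 3 = 0 ∧ ∀ row ∈ data, (data.headD []).length ≤ row.length))
instance (data : List (List Int)) : Decidable (Pre_scan2 data) := by unfold Pre_scan2; infer_instance

def pvWitness_scan2 : List (List Int) := [[1, 2], [3, 4], [5, 6], [7, 8], [9, 10], [11, 12]]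

def Spec_scan2 (data : List (List Int)) (out : List (Int × Int × Int)) : Prop := out = scan2_alt data
instance (data : List (List Int)) (out : List (Int × Int × Int)) : Decidable (Spec_scan2 data out) := by unfold Spec_scan2; infer_instance

-- ===== CLAIM (what is proved, stated in full; the proofs are below) =====
def Claim_equal_scan2 : Prop := ∀ (data : List (List Int)), Dom_scan2 data → Pre_scan2 data → Spec_scan2 data (scan2 data)

-- ===== LEMMAS AND PROOFS =====

-- the column extracted at index c, and the common column-major normal form both sides reach
def pvCol (data : List (List Int)) (c : Nat) : List Int :=
  data.map fun row => (PySem.List.pyGet? row (c : Int)).getD 0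

def pvTrips : List Int → List (Int × Int × Int)
  | a :: b :: c :: rest => (a, b, c) :: pvTrips rest
  | _ => []

lemma pvCol_length (data : List (List Int)) (c : Nat) : (pvCol data c).length = data.length := by
  simp [pvCol]

lemma pvCol_getElem (data : List (List Int)) (c r : Nat) (hr : r < data.length)
    (hc : c < data[r].length) :
    (pvCol data c)[r]'(by simpa [pvCol_length] using hr) = data[r][c] := by
  simp [pvCol, PySem.List.pyGet?_natCast, List.getElem?_eq_getElem hc]

lemma pvDropThree {L : List Int} {r : Nat} (h : r + 3 ≤ L.length) :
    L.drop r = L[r]'(by omega) :: L[r+1]'(by omega) :: L[r+2]'(by omega) :: L.drop (r + 3) := by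
  rw [List.drop_eq_getElem_cons (by omega : r < L.length),
      List.drop_eq_getElem_cons (by omega : r + 1 < L.length),
      List.drop_eq_getElem_cons (by omega : r + 2 < L.length)]

-- A's loop invariant: from state (r, c) the loop appends, to acc.reverse, the remaining
-- triples of column c (from row r) followed by all triples of the later columns
lemma scan2Loop_spec (hd : List Int) (tl : List (List Int)) (fuel r c : Nat)
    (acc : List (Int × Int × Int))
    (h3 : (hd :: tl).length % 3 = 0)
    (hrows : ∀ row ∈ hd :: tl, hd.length ≤ row.length)
    (hr : r < (hd :: tl).length) (hr3 : r % 3 = 0)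
    (hfuel : (hd.length - c) * ((hd :: tl).length + 3) ≤ fuel + r) :
    scan2Loop (hd :: tl) fuel r c acc =
      acc.reverse ++
        (if c < hd.length then
          pvTrips ((pvCol (hd :: tl) c).drop r) ++
            ((List.range' (c + 1) (hd.length - (c + 1))).flatMap fun c' => pvTrips (pvCol (hd :: tl) c'))
        else []) := by
  set data := hd :: tl with hdata
  induction fuel generalizing r c acc with
  | zero =>
    -- fuel 0 forces c ≥ hd.length (else the bound is contradictory)
    have hcw : ¬ c < hd.length := by
      intro hlt
      have h1 : 1 ≤ hd.length - c := by omega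
      have : data.length + 3 ≤ (hd.length - c) * (data.length + 3) :=
        le_mul_of_one_le_left (by omega) h1
      omega
    simp [scan2Loop, hcw]
  | succ fuel ih =>
    by_cases hcw : c < hd.length
    · -- one iteration: the three row indices and the three column reads all succeed
      have hlen : r + 3 ≤ data.length := by omega
      have g0 : PySem.List.pyGet? data 0 = some hd := by simp [hdata]
      have gr : PySem.List.pyGet? data (r : Int) = some (data[r]'(by omega)) := by
        simp [PySem.List.pyGet?_natCast, List.getElem?_eq_getElem (by omega : r < data.length)]
      have gr1 : PySem.List.pyGet? data ((r : Int) + 1) = some (data[r+1]'(by omega)) := by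
        rw [show ((r : Int) + 1) = ((r + 1 : Nat) : Int) by push_cast; ring,
          PySem.List.pyGet?_natCast]
        exact List.getElem?_eq_getElem (by omega)
      have gr2 : PySem.List.pyGet? data ((r : Int) + 2) = some (data[r+2]'(by omega)) := by
        rw [show ((r : Int) + 2) = ((r + 2 : Nat) : Int) by push_cast; ring,
          PySem.List.pyGet?_natCast]
        exact List.getElem?_eq_getElem (by omega)
      have hcellk : ∀ k : Nat, (hk : r + k < data.length) →
          PySem.List.pyGet? (data[r+k]'hk) (c : Int) = some ((data[r+k]'hk)[c]'(by
            exact lt_of_lt_of_le hcw (hrows _ (List.getElem_mem hk)))) := by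
        intro k hk
        simp [PySem.List.pyGet?_natCast,
          List.getElem?_eq_getElem (lt_of_lt_of_le hcw (hrows _ (List.getElem_mem hk)))]
      have gc0 := hcellk 0 (by omega)
      have gc1 := hcellk 1 (by omega)
      have gc2 := hcellk 2 (by omega)
      simp only [Nat.add_zero] at gc0
      -- the triple yielded equals the head triple of pvTrips of the dropped column
      have hdrop : (pvCol data c).drop r =
          (data[r]'(by omega))[c]'(by exact lt_of_lt_of_le hcw (hrows _ (List.getElem_mem (by omega)))) ::
          (data[r+1]'(by omega))[c]'(by exact lt_of_lt_of_le hcw (hrows _ (List.getElem_mem (by omega)))) ::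
          (data[r+2]'(by omega))[c]'(by exact lt_of_lt_of_le hcw (hrows _ (List.getElem_mem (by omega)))) ::
          (pvCol data c).drop (r + 3) := by
        rw [pvDropThree (by rw [pvCol_length]; omega)]
        rw [pvCol_getElem data c r (by omega) (lt_of_lt_of_le hcw (hrows _ (List.getElem_mem (by omega)))),
            pvCol_getElem data c (r+1) (by omega) (lt_of_lt_of_le hcw (hrows _ (List.getElem_mem (by omega)))),
            pvCol_getElem data c (r+2) (by omega) (lt_of_lt_of_le hcw (hrows _ (List.getElem_mem (by omega))))]
      by_cases hend : r + 3 ≥ data.length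
      · -- end of column: r + 3 = data.length, move to column c + 1
        have hre : r + 3 = data.length := by omega
        have hdropend : (pvCol data c).drop (r + 3) = [] := by
          rw [hre, ← pvCol_length data c]; exact List.drop_length
        simp only [scan2Loop, g0, gr, gr1, gr2, gc0, gc1, gc2, if_pos hcw, if_pos hend]
        rw [ih 0 (c + 1) _ (by omega) (by omega)
            (by
              obtain ⟨m, hm⟩ : ∃ m, hd.length - c = m + 1 := ⟨hd.length - c - 1, by omega⟩
              have hm' : hd.length - (c + 1) = m := by omega
              rw [hm']
              have : (hd.length - c) * (data.length + 3) = m * (data.length + 3) + (data.length + 3) := by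
                rw [hm, Nat.succ_mul]
              omega)]
        by_cases hcw1 : c + 1 < hd.length
        · have hrange : List.range' (c + 1) (hd.length - (c + 1)) =
              (c + 1) :: List.range' (c + 2) (hd.length - (c + 2)) := by
            have : hd.length - (c + 1) = (hd.length - (c + 2)) + 1 := by omega
            rw [this, List.range'_succ]
          simp [hcw1, hdrop, hdropend, pvTrips, hrange]
        · have : hd.length - (c + 1) = 0 := by omega
          simp [hcw1, hdrop, hdropend, pvTrips, this]
      · -- same column, next row triple
        simp only [scan2Loop, g0, gr, gr1, gr2, gc0, gc1, gc2, if_pos hcw, if_neg hend]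
        rw [ih (r + 3) c _ (by omega) (by omega) (by omega)]
        simp [hcw, hdrop, pvTrips]
    · simp [scan2Loop, hcw, hdata]

-- B-side lemma 1: pvZipStar IS the transpose of a rectangular block list
lemma pvZipStar_eq_transpose (w : Nat) (bs : List (List (Int × Int × Int)))
    (hlen : ∀ b ∈ bs, b.length = w) :
    pvZipStar w bs = (List.range w).map fun c => bs.map fun b => b.getD c (0, 0, 0) := by
  induction w generalizing bs with
  | zero => simp [pvZipStar]
  | succ w ih =>
    have hne : bs.any (·.isEmpty) = false := by
      rw [List.any_eq_false]
      intro b hb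
      have := hlen b hb
      cases b with
      | nil => simp at this
      | cons x xs => simp
    rw [pvZipStar, if_neg (by simp [hne])]
    rw [ih (bs.map List.tail) (by
      intro b hb
      obtain ⟨b', hb', rfl⟩ := List.mem_map.mp hb
      have := hlen b' hb'
      cases b' with
      | nil => simp at this
      | cons x xs => simp at this ⊢; omega)]
    rw [List.range_succ_eq_map, List.map_cons, List.map_map]
    congr 1
    · apply List.map_congr_left
      intro b hb
      have := hlen b hb
      cases b with
      | nil => simp at this
      | cons x xs => simp
    · apply List.map_congr_left
      intro c _
      simp only [Function.comp]
      rw [List.map_map]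
      apply List.map_congr_left
      intro b hb
      have := hlen b hb
      cases b with
      | nil => simp at this
      | cons x xs => simp [Nat.succ_eq_add_one]

-- B-side lemma 2: pvTrips of a list of length 3*m, written as a map over range m
lemma pvTrips_eq_map_range (m : Nat) (L : List Int) (hL : L.length = 3 * m) :
    pvTrips L = (List.range m).map fun k => (L.getD (3 * k) 0, L.getD (3 * k + 1) 0, L.getD (3 * k + 2) 0) := by
  induction m generalizing L with
  | zero =>
    have : L = [] := List.length_eq_zero_iff.mp (by omega)
    simp [this, pvTrips]
  | succ m ih =>
    obtain ⟨a, b, c, L', rfl⟩ : ∃ a b c L', L = a :: b :: c :: L' := by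
      match L, hL with
      | a :: b :: c :: L', _ => exact ⟨a, b, c, L', rfl⟩
    rw [show pvTrips (a :: b :: c :: L') = (a, b, c) :: pvTrips L' from rfl,
        List.range_succ_eq_map, List.map_cons, List.map_map,
        ih L' (by simp at hL; omega)]
    refine congrArg₂ List.cons (by simp) ?_
    apply List.map_congr_left
    intro k _
    simp only [Function.comp, Nat.succ_eq_add_one]
    rw [show 3 * (k + 1) + 2 = 3 * k + 2 + 1 + 1 + 1 by ring,
        show 3 * (k + 1) + 1 = 3 * k + 1 + 1 + 1 + 1 by ring,
        show 3 * (k + 1) = 3 * k + 1 + 1 + 1 by ring]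
    simp

-- B-side lemma 3: a pvCell with an in-range index is the matrix entry
lemma pvCell_eq (data : List (List Int)) (i c : Nat) (hi : i < data.length)
    (hc : c < (data[i]'hi).length) :
    pvCell data (i : Int) c = (data[i]'hi)[c]'hc := by
  simp [pvCell, PySem.List.pyGet?_natCast, List.getElem?_eq_getElem hi,
    List.getElem?_eq_getElem hc]

lemma pvCol_getD (data : List (List Int)) (c j : Nat) (hj : j < data.length) :
    (pvCol data c).getD j 0 = (PySem.List.pyGet? (data[j]'hj) (c : Int)).getD 0 := by
  rw [List.getD_eq_getElem _ _ (by simpa [pvCol_length] using hj)]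
  simp [pvCol]

-- B-side main lemma: under Pre_'s shape conditions, B's block-transpose normal form is
-- the same column-major flatMap as A's
lemma scan2_alt_eq_flatMap (hd : List Int) (tl : List (List Int))
    (h3 : (hd :: tl).length % 3 = 0)
    (hrows : ∀ row ∈ hd :: tl, hd.length ≤ row.length) :
    scan2_alt (hd :: tl) =
      (List.range hd.length).flatMap fun c => pvTrips (pvCol (hd :: tl) c) := by
  set data := hd :: tl with hdata
  obtain ⟨m, hm⟩ : ∃ m, data.length = 3 * m := ⟨data.length / 3, by omega⟩
  have hm0 : 0 < m := by
    have : 0 < data.length := by simp [hdata]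
    omega
  -- range(0, len(data), 3) = [3*k for k in range m]
  have hrange : PySem.List.pyRange 0 (data.length : Int) 3 = (List.range m).map fun k => ((3 * k : Nat) : Int) := by
    rw [PySem.List.pyRange_of_pos 0 (data.length : Int) (by omega)]
    rw [if_pos (by exact_mod_cast by omega : (0 : Int) < (data.length : Int))]
    have hmI : (data.length : Int) = 3 * (m : Int) := by exact_mod_cast hm
    have : (((data.length : Int) - 0 + 3 - 1) / 3).toNat = m := by
      have : ((data.length : Int) - 0 + 3 - 1) / 3 = (m : Int) := by omega
      rw [this]; simp
    rw [this]
    apply List.map_congr_left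
    intro k _
    push_cast; ring
  have hcell : ∀ k c : Nat, k < m → c < hd.length →
      (pvCell data ((3 * k : Nat) : Int) c,
       pvCell data (((3 * k : Nat) : Int) + 1) c,
       pvCell data (((3 * k : Nat) : Int) + 2) c) =
      ((pvCol data c).getD (3 * k) 0, (pvCol data c).getD (3 * k + 1) 0, (pvCol data c).getD (3 * k + 2) 0) := by
    intro k c hk hc
    have e1 : (((3 * k : Nat) : Int) + 1) = ((3 * k + 1 : Nat) : Int) := by push_cast; ring
    have e2 : (((3 * k : Nat) : Int) + 2) = ((3 * k + 2 : Nat) : Int) := by push_cast; ring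
    have hb : ∀ (d : Nat) (hlt : 3 * k + d < data.length), c < (data[3 * k + d]'hlt).length →
        pvCell data ((3 * k + d : Nat) : Int) c = (pvCol data c).getD (3 * k + d) 0 := by
      intro d hlt hcd
      rw [pvCell_eq data (3 * k + d) c hlt hcd, pvCol_getD data c (3 * k + d) hlt,
          PySem.List.pyGet?_natCast, List.getElem?_eq_getElem hcd]
      rfl
    have hl0 : 3 * k + 0 < data.length := by omega
    have hl1 : 3 * k + 1 < data.length := by omega
    have hl2 : 3 * k + 2 < data.length := by omega
    have hc0 : c < (data[3 * k + 0]'hl0).length := lt_of_lt_of_le hc (hrows _ (List.getElem_mem hl0))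
    have hc1 : c < (data[3 * k + 1]'hl1).length := lt_of_lt_of_le hc (hrows _ (List.getElem_mem hl1))
    have hc2 : c < (data[3 * k + 2]'hl2).length := lt_of_lt_of_le hc (hrows _ (List.getElem_mem hl2))
    have b0 := hb 0 hl0 hc0
    have b1 := hb 1 hl1 hc1
    have b2 := hb 2 hl2 hc2
    simp only [Nat.add_zero] at b0
    rw [e1, e2, b0, b1, b2]
  -- unfold B, apply the transpose lemma, then rewrite each cell
  have g0 : PySem.List.pyGet? data 0 = some hd := by simp [hdata]
  unfold scan2_alt
  rw [g0]
  simp only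
  rw [hrange, List.map_map]
  rw [pvZipStar_eq_transpose hd.length _ (by
    intro b hb
    obtain ⟨k, _, rfl⟩ := List.mem_map.mp hb
    simp)]
  rw [List.flatMap_def]
  refine congrArg List.flatten (List.map_congr_left ?_)
  intro c hc
  have hc' : c < hd.length := List.mem_range.mp hc
  rw [pvTrips_eq_map_range m (pvCol data c) (by rw [pvCol_length]; omega), List.map_map]
  apply List.map_congr_left
  intro k hk
  have hk' : k < m := List.mem_range.mp hk
  simp only [Function.comp]
  rw [PySem.List.getD_map_range _ _ _ _ hc']
  exact hcell k c hk' hc'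

-- ===== VERDICT (by name: the statement is the Claim_ definition above) =====
theorem scan2_spec : Claim_equal_scan2 := by
  intro data _ hpre
  obtain ⟨hne, hcase⟩ := hpre
  obtain ⟨hd, tl, rfl⟩ : ∃ h t, data = h :: t := by
    cases data with
    | nil => exact absurd rfl hne
    | cons h t => exact ⟨h, t, rfl⟩
  show scan2 (hd :: tl) = scan2_alt (hd :: tl)
  rcases hcase with hw0 | ⟨h3, hrows⟩
  · -- empty first row: A's loop exits immediately, B's blocks are lists of w = 0 triples
    simp only [List.headD_cons] at hw0
    simp [scan2, scan2Loop, scan2_alt, pvZipStar, hw0]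
  · simp only [List.headD_cons] at hrows
    rw [scan2_alt_eq_flatMap hd tl h3 hrows]
    rw [scan2, scan2Loop_spec hd tl _ 0 0 [] h3 hrows (by simp) (by omega)
        (by
          simp only [List.headD_cons, List.length_cons]
          calc hd.length * (tl.length + 1 + 3)
              ≤ (hd.length + 1) * (tl.length + 1 + 3) := by
                exact Nat.mul_le_mul_right _ (by omega)
            _ ≤ (hd.length + 1) * (tl.length + 1 + 3) + 0 := by omega)]
    by_cases hw : 0 < hd.length
    · have hrange : List.range hd.length = 0 :: List.range' 1 (hd.length - 1) := by
        rw [List.range_eq_range']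
        have : hd.length = (hd.length - 1) + 1 := by omega
        rw [this, List.range'_succ]; simp
      rw [hrange]
      simp [hw]
    · simp [show hd.length = 0 by omega]
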